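-- pv_equiv track=rewrite | github.com/robertdvdk/Thesis | seq2domain/cnn/load_data.py | tokenize_domains
-- ===== SOURCE A (Python) =====
-- def tokenize_domains(domains_dict):
--     """Makes a list of all domains, and makes a dict mapping each unique
--         domain to a token (int)
--
--     Args:
--         domains_dict::dict
--             dictionary containing all processed data:
--                 {UniProt ID: (promoter sequence: [domains])}
--
--     Returns:
--         domain_token_dict::dict
--             dictionary containing all domains in the dataset with corresponding
--                 tokens: {domain: token}
--         num_domains::int
--             the number of domains contained in the dataset
--     """
--     domain_token_dict = {}
--     num_domains = 1
--     for promseq, domains in domains_dict.values():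
--         for domain in domains:
--             if domain not in domain_token_dict:
--                 domain_token_dict[domain] = num_domains
--                 num_domains += 1
--     return domain_token_dict, num_domains - 1  # started counting from 1
-- ===== SOURCE B (Python) =====
-- def tokenize_domains(domains_dict):
--     # Worklist algorithm: repeatedly take the first pending domain, give it the
--     # next token, and filter every later occurrence out of the worklist.
--     pending = [d for promseq, domains in domains_dict.values() for d in domains]
--     domain_token_dict = {}
--     while pending:
--         head = pending[0]
--         domain_token_dict[head] = len(domain_token_dict) + 1
--         pending = [d for d in pending[1:] if d != head]
--     return domain_token_dict, len(domain_token_dict)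
-- ===== Notes on version B (the rewrite author's own statement) =====
-- stated objective: alternative
-- what changed: Replaces A's grow-a-seen-dict-with-membership-test-and-running-counter loop by a shrinking-worklist selection algorithm: flatten all domains, then repeatedly pop the first pending domain, assign it token len(dict)+1, and filter every later occurrence out of the worklist; the count is the final dict length instead of a counter. It trades A's O(1) dict membership for repeated list filtering, so it is slower on large inputs with many distinct domains.
import Mathlib
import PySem

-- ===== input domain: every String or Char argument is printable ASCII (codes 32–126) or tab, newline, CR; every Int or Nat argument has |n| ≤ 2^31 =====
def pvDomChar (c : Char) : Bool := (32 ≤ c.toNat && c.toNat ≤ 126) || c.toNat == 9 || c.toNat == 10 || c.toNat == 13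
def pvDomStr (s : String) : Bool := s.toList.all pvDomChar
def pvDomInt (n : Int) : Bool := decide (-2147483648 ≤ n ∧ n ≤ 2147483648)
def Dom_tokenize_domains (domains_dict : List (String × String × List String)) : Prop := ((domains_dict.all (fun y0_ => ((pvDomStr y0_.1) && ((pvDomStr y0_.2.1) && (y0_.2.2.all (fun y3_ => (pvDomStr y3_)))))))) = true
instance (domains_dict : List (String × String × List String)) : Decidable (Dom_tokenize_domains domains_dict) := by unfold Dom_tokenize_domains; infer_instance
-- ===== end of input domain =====

-- B replaces A's membership-test-plus-running-counter loop over a growing dict by a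
-- worklist algorithm: pop the first pending domain, number it, and filter all its later
-- occurrences out of the shrinking worklist (objective: alternative).

-- ===== PORT A =====
-- literal port: dict + running counter, nested loops over values() and domains
def tokenize_domains (domains_dict : List (String × String × List String)) : (List (String × Int)) × Int :=
  let st :=
    domains_dict.foldl
      (fun (st : PySem.Dict String Int × Int) kv =>
        kv.2.2.foldl
          (fun (st : PySem.Dict String Int × Int) dmn =>
            if st.1.contains dmn then st
            else (st.1.insert dmn st.2, st.2 + 1))
          st)
      (PySem.Dict.empty, 1)
  (st.1.items, st.2 - 1)

-- ===== PORT B =====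
-- literal port of Source B's while-loop: pop head, token = len(dict)+1, filter head out
def pvWorklist (pending : List String) (tok : PySem.Dict String Int) : PySem.Dict String Int :=
  match pending with
  | [] => tok
  | h :: t =>
      pvWorklist (t.filter (fun d => decide (d ≠ h)))
        (tok.insert h ((tok.items.length : Int) + 1))
termination_by pending.length
decreasing_by
  simp only [List.length_unattach]
  exact Nat.lt_succ_of_le (le_trans (List.length_filter_le _ _) (by simp))

def tokenize_domains_alt (domains_dict : List (String × String × List String)) : (List (String × Int)) × Int :=
  let tok := pvWorklist (domains_dict.flatMap (fun kv => kv.2.2)) PySem.Dict.empty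
  (tok.items, (tok.items.length : Int))

-- ===== PRECONDITION & SPEC =====
def Spec_tokenize_domains (domains_dict : List (String × String × List String)) (out : (List (String × Int)) × Int) : Prop := out = tokenize_domains_alt domains_dict
instance (domains_dict : List (String × String × List String)) (out : (List (String × Int)) × Int) : Decidable (Spec_tokenize_domains domains_dict out) := by unfold Spec_tokenize_domains; infer_instance

-- ===== CLAIM (what is proved, stated in full; the proofs are below) =====
def Claim_equal_tokenize_domains : Prop := ∀ (domains_dict : List (String × String × List String)), Dom_tokenize_domains domains_dict → Spec_tokenize_domains domains_dict (tokenize_domains domains_dict)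

-- ===== LEMMAS AND PROOFS =====

-- the dict whose items number the (nodup) list u from 1
def pvNumbered (u : List String) : List (String × Int) :=
  (PySem.List.enumerate u 1).map (fun p => (p.2, p.1))

theorem pvNumbered_keys (u : List String) :
    (PySem.Dict.mk (pvNumbered u)).keys = u := by
  simp [pvNumbered, PySem.Dict.keys_mk, List.map_map, Function.comp_def,
        PySem.List.map_snd_enumerate]

theorem pvNumbered_append (u : List String) (d : String) :
    pvNumbered (u ++ [d]) = pvNumbered u ++ [(d, (u.length : Int) + 1)] := by
  simp [pvNumbered, PySem.List.enumerate_append, PySem.List.enumerate_cons,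
        PySem.List.enumerate_nil, add_comm]

theorem pvNumbered_length (u : List String) : (pvNumbered u).length = u.length := by
  simp [pvNumbered, PySem.List.length_enumerate]

theorem pvInsert_fresh (u : List String) (d : String) (hd : d ∉ u) :
    (PySem.Dict.mk (pvNumbered u)).insert d ((u.length : Int) + 1)
      = PySem.Dict.mk (pvNumbered (u ++ [d])) := by
  have hc : (PySem.Dict.mk (pvNumbered u)).contains d = false := by
    rw [PySem.Dict.contains_eq_decide_mem_keys, pvNumbered_keys]
    simpa using hd
  apply PySem.Dict.ext
  rw [PySem.Dict.items_insert, hc]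
  simp [pvNumbered_append]

-- the order-preserving dedup computed by B's worklist, as a pure list function
def pvFiltDedup (l : List String) : List String :=
  match l with
  | [] => []
  | h :: t => h :: pvFiltDedup (t.filter (fun d => decide (d ≠ h)))
termination_by l.length
decreasing_by
  simp only [List.length_unattach]
  exact Nat.lt_succ_of_le (le_trans (List.length_filter_le _ _) (by simp))

-- the new first occurrences A's loop appends beyond a set of already-seen keys u
def pvNew (u l : List String) : List String :=
  match l with
  | [] => []
  | h :: t => if h ∈ u then pvNew u t else h :: pvNew (u ++ [h]) t

theorem pvNew_eq_filtDedup (l : List String) :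
    ∀ u : List String, pvNew u l = pvFiltDedup (l.filter (fun d => decide (d ∉ u))) := by
  induction l with
  | nil => intro u; simp [pvNew, pvFiltDedup]
  | cons h t ih =>
    intro u
    by_cases hu : h ∈ u
    · simp [pvNew, hu, ih u]
    · rw [show pvNew u (h :: t) = h :: pvNew (u ++ [h]) t by simp [pvNew, hu]]
      rw [show (h :: t).filter (fun d => decide (d ∉ u)) = h :: t.filter (fun d => decide (d ∉ u)) by
            simp [hu]]
      rw [show pvFiltDedup (h :: t.filter (fun d => decide (d ∉ u)))
            = h :: pvFiltDedup ((t.filter (fun d => decide (d ∉ u))).filter (fun d => decide (d ≠ h)))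
          from by rw [pvFiltDedup]]
      rw [ih (u ++ [h]), List.filter_filter]
      refine congrArg (fun l => h :: pvFiltDedup l) (List.filter_congr ?_)
      intro d _
      by_cases hdh : d = h
      · simp [hdh]
      · simp [hdh, List.mem_append]

-- A's inner step, over the flattened stream of domains
def pvStep (st : PySem.Dict String Int × Int) (d : String) : PySem.Dict String Int × Int :=
  if st.1.contains d then st else (st.1.insert d st.2, st.2 + 1)

theorem pvFoldl_flatMap (l : List (String × String × List String))
    (st : PySem.Dict String Int × Int) :
    l.foldl (fun st kv => kv.2.2.foldl pvStep st) st
      = (l.flatMap (fun kv => kv.2.2)).foldl pvStep st := by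
  induction l generalizing st with
  | nil => rfl
  | cons kv rest ih => simp [List.flatMap_cons, List.foldl_append, ih]

theorem pvStep_loop (l : List String) : ∀ u : List String,
    l.foldl pvStep (PySem.Dict.mk (pvNumbered u), (u.length : Int) + 1)
      = (PySem.Dict.mk (pvNumbered (u ++ pvNew u l)),
         ((u ++ pvNew u l).length : Int) + 1) := by
  induction l with
  | nil => intro u; simp [pvNew]
  | cons d rest ih =>
    intro u
    by_cases hd : d ∈ u
    · have hc : (PySem.Dict.mk (pvNumbered u)).contains d = true := by
        rw [PySem.Dict.contains_eq_decide_mem_keys, pvNumbered_keys]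
        simpa using hd
      simpa [List.foldl_cons, pvStep, hc, pvNew, hd] using ih u
    · have hc : (PySem.Dict.mk (pvNumbered u)).contains d = false := by
        rw [PySem.Dict.contains_eq_decide_mem_keys, pvNumbered_keys]
        simpa using hd
      have h2 := ih (u ++ [d])
      simp only [List.foldl_cons, pvStep, hc, Bool.false_eq_true, if_false,
        pvInsert_fresh u d hd]
      rw [show pvNew u (d :: rest) = d :: pvNew (u ++ [d]) rest by simp [pvNew, hd]]
      rw [show u ++ d :: pvNew (u ++ [d]) rest = (u ++ [d]) ++ pvNew (u ++ [d]) rest by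
            simp [List.append_assoc]]
      rw [show ((u.length : Int) + 1) + 1 = ((u ++ [d]).length : Int) + 1 by
            simp [List.length_append]]
      exact h2

theorem pvWorklist_inv : ∀ (n : ℕ) (l : List String), l.length ≤ n →
    ∀ u : List String, (∀ x ∈ l, x ∉ u) →
    pvWorklist l (PySem.Dict.mk (pvNumbered u))
      = PySem.Dict.mk (pvNumbered (u ++ pvFiltDedup l)) := by
  intro n
  induction n with
  | zero =>
    intro l hl u _
    have : l = [] := List.length_eq_zero_iff.mp (Nat.le_zero.mp hl)
    subst this
    simp [pvWorklist, pvFiltDedup]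
  | succ n ih =>
    intro l hl u hdisj
    match l with
    | [] => simp [pvWorklist, pvFiltDedup]
    | h :: t =>
      have hh : h ∉ u := hdisj h (by simp)
      rw [show pvWorklist (h :: t) (PySem.Dict.mk (pvNumbered u))
            = pvWorklist (t.filter (fun d => decide (d ≠ h)))
                ((PySem.Dict.mk (pvNumbered u)).insert h
                  (((PySem.Dict.mk (pvNumbered u)).items.length : Int) + 1)) from by
            rw [pvWorklist]]
      rw [show (PySem.Dict.mk (pvNumbered u)).items = pvNumbered u from rfl]
      rw [pvNumbered_length, pvInsert_fresh u h hh]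
      have hlen : (t.filter (fun d => decide (d ≠ h))).length ≤ n :=
        le_trans (List.length_filter_le _ _) (Nat.lt_succ_iff.mp hl)
      have hdisj' : ∀ x ∈ t.filter (fun d => decide (d ≠ h)), x ∉ u ++ [h] := by
        intro x hx
        have hxt := List.mem_of_mem_filter hx
        have hxh : x ≠ h := by simpa using List.of_mem_filter hx
        simp [List.mem_append, hxh]
        exact hdisj x (by simp [hxt])
      rw [ih _ hlen _ hdisj']
      rw [show pvFiltDedup (h :: t) = h :: pvFiltDedup (t.filter (fun d => decide (d ≠ h))) from by
            rw [pvFiltDedup]]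
      simp [List.append_assoc]

-- ===== VERDICT (by name: the statement is the Claim_ definition above) =====
theorem tokenize_domains_spec : Claim_equal_tokenize_domains := by
  intro dd _
  unfold Spec_tokenize_domains tokenize_domains tokenize_domains_alt
  set flat := dd.flatMap (fun kv => kv.2.2) with hflat
  rw [show (fun (st : PySem.Dict String Int × Int) kv =>
        List.foldl (fun st dmn => if st.1.contains dmn then st
          else (st.1.insert dmn st.2, st.2 + 1)) st kv.2.2)
      = (fun st (kv : String × String × List String) => kv.2.2.foldl pvStep st) from rfl]
  rw [pvFoldl_flatMap]
  rw [show ((PySem.Dict.empty : PySem.Dict String Int), (1 : Int))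
        = (PySem.Dict.mk (pvNumbered []), (([] : List String).length : Int) + 1) from rfl]
  rw [pvStep_loop flat []]
  have hB : pvWorklist flat PySem.Dict.empty
      = PySem.Dict.mk (pvNumbered ([] ++ pvFiltDedup flat)) := by
    exact pvWorklist_inv flat.length flat le_rfl [] (by simp)
  rw [hB]
  have hnew : pvNew [] flat = pvFiltDedup flat := by
    rw [pvNew_eq_filtDedup flat []]
    congr 1
    exact List.filter_eq_self.mpr (fun a _ => by simp)
  simp [hnew, pvNumbered_length]
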